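-- pv_equiv track=rewrite | github.com/vin-ice/alx-system_engineering-devops | 0x16-api_advanced/100-count.py | count_parse
-- ===== SOURCE A (Python) =====
-- def count_parse(symbols, data_list):
--     """Counts instance of each symbol in data"""
--     data = []
--     if isinstance(symbols, list):
--         symbols = {s: 0 for s in symbols}
--     for line in data_list:
--         data = [w.strip().lower() for w in line.split()]
--         for word in data:
--             if word in symbols.keys():
--                 symbols[word] += 1
--     return symbols
-- ===== SOURCE B (Python) =====
-- def count_parse(symbols, data_list):
--     """Counts instance of each symbol in data"""
--     words = [w.strip().lower() for line in data_list for w in line.split()]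
--     counts = {}
--     for w in words:
--         counts[w] = counts.get(w, 0) + 1
--     if isinstance(symbols, list):
--         symbols = dict.fromkeys(symbols, 0)
--     for key in symbols:
--         symbols[key] += counts.get(key, 0)
--     return symbols
-- ===== Notes on version B (the rewrite author's own statement) =====
-- stated objective: alternative
-- what changed: A filters and increments the symbol dict inline while scanning each line's words; B first flattens the corpus into one normalized word list, builds a frequency table of ALL words in one pass, then in a separate pass adds each symbol's tabulated count to the symbol dict.
import Mathlib
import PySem

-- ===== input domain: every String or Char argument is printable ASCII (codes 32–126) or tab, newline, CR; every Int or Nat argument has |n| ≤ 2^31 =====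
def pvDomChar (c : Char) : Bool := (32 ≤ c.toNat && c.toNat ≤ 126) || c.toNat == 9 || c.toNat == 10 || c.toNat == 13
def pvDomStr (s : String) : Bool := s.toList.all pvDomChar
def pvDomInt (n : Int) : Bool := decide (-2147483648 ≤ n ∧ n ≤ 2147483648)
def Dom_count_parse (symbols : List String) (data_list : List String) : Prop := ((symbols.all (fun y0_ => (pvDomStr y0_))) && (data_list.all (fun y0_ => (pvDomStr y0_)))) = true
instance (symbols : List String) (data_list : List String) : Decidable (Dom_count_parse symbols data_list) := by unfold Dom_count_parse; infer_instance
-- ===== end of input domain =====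

-- B restructures A's inline filter-and-increment scan into: flatten+normalize the whole corpus,
-- tabulate frequencies of all words in one pass, then add each symbol's tabulated count in a
-- separate pass over the symbol dict (alternative decomposition, same cost).
-- A mutates (rebinds) its dict; for a list `symbols` both build a fresh dict, so only the return value matters.

-- ===== PORT A =====
def count_parse (symbols : List String) (data_list : List String) : List (String × Int) :=
  -- symbols = {s: 0 for s in symbols}
  let sy0 : PySem.Dict String Int := symbols.foldl (fun d s => d.insert s 0) PySem.Dict.empty
  -- for line in data_list: data = [w.strip().lower() for w in line.split()]; for word in data: if word in symbols: symbols[word] += 1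
  let syF := data_list.foldl (fun sy line =>
    ((PySem.Str.split₀ line).map (fun w => PySem.Str.lower (PySem.Str.strip w))).foldl
      (fun sy word => if sy.contains word then sy.modify word 0 (· + 1) else sy) sy) sy0
  syF.items

-- ===== PORT B =====
def count_parse_alt (symbols : List String) (data_list : List String) : List (String × Int) :=
  -- words = [w.strip().lower() for line in data_list for w in line.split()]
  let words := data_list.flatMap (fun line =>
    (PySem.Str.split₀ line).map (fun w => PySem.Str.lower (PySem.Str.strip w)))
  -- counts = {}; for w in words: counts[w] = counts.get(w, 0) + 1
  let counts : PySem.Dict String Int := words.foldl (fun d w => d.insert w (d.getD w 0 + 1)) PySem.Dict.empty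
  -- symbols = dict.fromkeys(symbols, 0)
  let sy : PySem.Dict String Int := symbols.foldl (fun d s => d.insert s 0) PySem.Dict.empty
  -- for key in symbols: symbols[key] += counts.get(key, 0)
  let syF := sy.keys.foldl (fun d key => d.modify key 0 (· + counts.getD key 0)) sy
  syF.items

-- ===== PRECONDITION & SPEC =====
def Spec_count_parse (symbols : List String) (data_list : List String) (out : List (String × Int)) : Prop := out = count_parse_alt symbols data_list
instance (symbols : List String) (data_list : List String) (out : List (String × Int)) : Decidable (Spec_count_parse symbols data_list out) := by unfold Spec_count_parse; infer_instance

-- ===== CLAIM (what is proved, stated in full; the proofs are below) =====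
def Claim_equal_count_parse : Prop := ∀ (symbols : List String) (data_list : List String), Dom_count_parse symbols data_list → Spec_count_parse symbols data_list (count_parse symbols data_list)

-- ===== LEMMAS AND PROOFS =====

-- A's conditional increment loop never changes the key list.
theorem keys_foldl_condA (ws : List String) (d : PySem.Dict String Int) :
    (ws.foldl (fun sy word => if sy.contains word then sy.modify word 0 (· + 1) else sy) d).keys = d.keys := by
  induction ws generalizing d with
  | nil => rfl
  | cons w ws ih =>
    simp only [List.foldl_cons]
    by_cases hw : d.contains w = true
    · rw [if_pos hw, ih, PySem.Dict.keys_modify, PySem.Dict.keys_insert_of_contains _ _ hw]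
    · rw [if_neg hw, ih]

-- value of A's conditional increment loop at any key
theorem getD_foldl_condA (ws : List String) (d : PySem.Dict String Int) (k : String) :
    (ws.foldl (fun sy word => if sy.contains word then sy.modify word 0 (· + 1) else sy) d).getD k 0
      = d.getD k 0 + (if d.contains k then (ws.count k : Int) else 0) := by
  induction ws generalizing d with
  | nil => simp
  | cons w ws ih =>
    simp only [List.foldl_cons]
    by_cases hw : d.contains w = true
    · rw [if_pos hw, ih, PySem.Dict.getD_modify, PySem.Dict.contains_modify]
      by_cases hk : k = w
      · subst hk
        simp only [BEq.rfl, Bool.true_or, hw, List.count_cons_self]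
        push_cast
        ring
      · have hwk : ¬ (w = k) := fun h => hk h.symm
        simp [hwk, hk]
    · rw [if_neg hw, ih]
      by_cases hk : k = w
      · subst hk; simp [hw]
      · have hwk : ¬ (w = k) := fun h => hk h.symm
        simp [hwk]

-- B's per-key addition loop, over keys present in the dict, never changes the key list...
theorem keys_foldl_condB (L : List String) (c : String → Int) (d : PySem.Dict String Int)
    (hsub : ∀ a ∈ L, d.contains a = true) :
    (L.foldl (fun d key => d.modify key 0 (· + c key)) d).keys = d.keys := by
  induction L generalizing d with
  | nil => rfl
  | cons a L ih =>
    simp only [List.foldl_cons]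
    have ha : d.contains a = true := hsub a (List.mem_cons_self ..)
    have hkeys : (d.modify a 0 (· + c a)).keys = d.keys := by
      rw [PySem.Dict.keys_modify, PySem.Dict.keys_insert_of_contains _ _ ha]
    rw [ih _ (fun x hx => by
      rw [PySem.Dict.contains_modify]
      simp [hsub x (List.mem_cons_of_mem _ hx)]), hkeys]

-- ... and, when the key list is Nodup, adds c k exactly once to each visited key.
theorem getD_foldl_condB (L : List String) (c : String → Int) (d : PySem.Dict String Int) (k : String)
    (hnd : L.Nodup) (hsub : ∀ a ∈ L, d.contains a = true) :
    (L.foldl (fun d key => d.modify key 0 (· + c key)) d).getD k 0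
      = d.getD k 0 + (if k ∈ L then c k else 0) := by
  induction L generalizing d with
  | nil => simp
  | cons a L ih =>
    simp only [List.foldl_cons]
    have hnd' : L.Nodup := (List.nodup_cons.mp hnd).2
    rw [ih _ hnd' (fun x hx => by
      rw [PySem.Dict.contains_modify]
      simp [hsub x (List.mem_cons_of_mem _ hx)]), PySem.Dict.getD_modify]
    by_cases hk : k = a
    · subst hk
      have : k ∉ L := (List.nodup_cons.mp hnd).1
      simp [this]
    · simp [hk]

-- the two loop shapes agree item-for-item over any start dict with Nodup keys
theorem core_items (words : List String) (sy0 : PySem.Dict String Int) (hnd : sy0.keys.Nodup) :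
    (words.foldl (fun sy word => if sy.contains word then sy.modify word 0 (· + 1) else sy) sy0).items
      = (sy0.keys.foldl (fun d key => d.modify key 0
          (· + (words.foldl (fun d w => d.insert w (d.getD w 0 + 1)) PySem.Dict.empty).getD key 0)) sy0).items := by
  have hsub : ∀ a ∈ sy0.keys, sy0.contains a = true :=
    fun a ha => (PySem.Dict.contains_iff_mem_keys sy0 a).mpr ha
  have hkA := keys_foldl_condA words sy0
  have hkB := keys_foldl_condB sy0.keys
    (fun key => (words.foldl (fun d w => d.insert w (d.getD w 0 + 1)) PySem.Dict.empty).getD key 0) sy0 hsub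
  rw [PySem.Dict.items_eq_map_keys _ (by rw [hkA]; exact hnd) 0,
      PySem.Dict.items_eq_map_keys _ (by rw [hkB]; exact hnd) 0, hkA, hkB]
  apply List.map_congr_left
  intro k hk
  have hcont : sy0.contains k = true := hsub k hk
  rw [getD_foldl_condA words sy0 k,
      getD_foldl_condB sy0.keys
        (fun key => (words.foldl (fun d w => d.insert w (d.getD w 0 + 1)) PySem.Dict.empty).getD key 0)
        sy0 k hnd hsub,
      PySem.Dict.getD_foldl_insert_add_one]
  simp [hcont, hk]

theorem count_parse_eq_alt (symbols : List String) (data_list : List String) :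
    count_parse symbols data_list = count_parse_alt symbols data_list := by
  simp only [count_parse, count_parse_alt]
  rw [← List.foldl_flatMap]
  exact core_items _ _
    (PySem.Dict.nodup_keys_foldl_insert symbols (fun _ _ => 0) PySem.Dict.empty
      PySem.Dict.nodup_keys_empty)

-- ===== VERDICT (by name: the statement is the Claim_ definition above) =====
theorem count_parse_spec : Claim_equal_count_parse := by
  intro symbols data_list _
  exact count_parse_eq_alt symbols data_list
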